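-- pv_equiv track=rewrite | github.com/lanl/dsi | dsi/backends/wwpdb.py | classify_usability
-- ===== SOURCE A (Python) =====
-- from typing import Any, Dict, Iterable, List, Optional
--
-- def classify_usability(exts: Iterable[Optional[str]]) -> str:  #Classifies resource formats.
--     ext_set = {e.lower() for e in exts if e}
--
--     if not ext_set:
--         return "lookup_failed"
--
--     tabular = {"csv", "tsv", "xlsx", "xls", "json", "xml", "txt", "parquet"}
--     scientific = {"cif", "cif.gz", "nc", "h5", "hdf5", "cdf"}
--     archive_only = {"zip", "tar", "tar.gz", "gz"}
--
--     if ext_set & tabular: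
--         return "tabular_or_easy_parse"
--     if ext_set & scientific:
--         return "scientific_structured"
--     if ext_set <= archive_only:
--         return "archive_only"
--     return "other_format"
-- ===== SOURCE B (Python) =====
-- # One-pass classification via a single inverse lookup table instead of
-- # three sets with intersection/subset operations.
-- _LOOKUP = {
--     "csv": "tabular", "tsv": "tabular", "xlsx": "tabular", "xls": "tabular",
--     "json": "tabular", "xml": "tabular", "txt": "tabular", "parquet": "tabular",
--     "cif": "scientific", "cif.gz": "scientific", "nc": "scientific",
--     "h5": "scientific", "hdf5": "scientific", "cdf": "scientific",
--     "zip": "archive", "tar": "archive", "tar.gz": "archive", "gz": "archive",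
-- }
--
-- def classify_usability(exts):
--     seen = False
--     has_tab = False
--     has_sci = False
--     all_archive = True
--     for e in exts:
--         if not e:
--             continue
--         seen = True
--         cat = _LOOKUP.get(e.lower(), "other")
--         if cat == "tabular":
--             has_tab = True
--         elif cat == "scientific":
--             has_sci = True
--         if cat != "archive":
--             all_archive = False
--     if not seen:
--         return "lookup_failed"
--     if has_tab:
--         return "tabular_or_easy_parse"
--     if has_sci:
--         return "scientific_structured"
--     if all_archive:
--         return "archive_only"
--     return "other_format"
-- ===== Notes on version B (the rewrite author's own statement) =====
-- stated objective: idiomatic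
-- what changed: Replaced the three category sets plus set-intersection/subset tests on a materialised ext_set by a single inverse extension->category lookup table and one accumulating pass over the input maintaining seen/has_tab/has_sci/all_archive flags.
import Mathlib
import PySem

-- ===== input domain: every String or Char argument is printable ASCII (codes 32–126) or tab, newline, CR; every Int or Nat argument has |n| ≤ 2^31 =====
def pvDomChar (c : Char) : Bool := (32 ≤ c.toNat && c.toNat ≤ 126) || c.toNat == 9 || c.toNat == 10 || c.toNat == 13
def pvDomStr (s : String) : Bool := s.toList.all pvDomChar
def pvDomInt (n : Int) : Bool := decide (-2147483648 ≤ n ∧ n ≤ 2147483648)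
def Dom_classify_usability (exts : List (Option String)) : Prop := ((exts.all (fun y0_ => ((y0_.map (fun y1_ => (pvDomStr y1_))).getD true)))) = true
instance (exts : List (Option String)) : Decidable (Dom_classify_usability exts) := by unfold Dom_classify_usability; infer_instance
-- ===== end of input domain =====

-- B replaces A's three category sets and set-intersection/subset tests with one inverse
-- extension→category lookup table and a single flag-accumulating pass; same result everywhere.

-- ===== PORT A =====
def pvTabular : PySem.Set String :=
  PySem.Set.ofList ["csv", "tsv", "xlsx", "xls", "json", "xml", "txt", "parquet"]
def pvScientific : PySem.Set String :=
  PySem.Set.ofList ["cif", "cif.gz", "nc", "h5", "hdf5", "cdf"]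
def pvArchiveOnly : PySem.Set String :=
  PySem.Set.ofList ["zip", "tar", "tar.gz", "gz"]

def classify_usability (exts : List (Option String)) : String :=
  -- ext_set = {e.lower() for e in exts if e}
  let extSet : PySem.Set String :=
    PySem.Set.ofList (exts.filterMap (fun o =>
      match o with
      | none => none
      | some e => if e = "" then none else some (PySem.Str.lower e)))
  if extSet.isEmpty then "lookup_failed"
  else if !(PySem.Set.inter extSet pvTabular).isEmpty then "tabular_or_easy_parse"
  else if !(PySem.Set.inter extSet pvScientific).isEmpty then "scientific_structured"
  else if PySem.Set.issubset extSet pvArchiveOnly then "archive_only"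
  else "other_format"

-- ===== PORT B =====
def pvLookup : PySem.Dict String String :=
  PySem.Dict.ofList
    [("csv", "tabular"), ("tsv", "tabular"), ("xlsx", "tabular"), ("xls", "tabular"),
     ("json", "tabular"), ("xml", "tabular"), ("txt", "tabular"), ("parquet", "tabular"),
     ("cif", "scientific"), ("cif.gz", "scientific"), ("nc", "scientific"),
     ("h5", "scientific"), ("hdf5", "scientific"), ("cdf", "scientific"),
     ("zip", "archive"), ("tar", "archive"), ("tar.gz", "archive"), ("gz", "archive")]

def classify_usability_alt (exts : List (Option String)) : String :=
  -- state: (seen, has_tab, has_sci, all_archive)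
  let st := exts.foldl (fun (st : Bool × Bool × Bool × Bool) o =>
    match o with
    | none => st
    | some e =>
      if e = "" then st
      else
        let cat := PySem.Dict.getD pvLookup (PySem.Str.lower e) "other"
        (true,
         st.2.1 || cat == "tabular",
         st.2.2.1 || (!(cat == "tabular") && cat == "scientific"),
         st.2.2.2 && cat == "archive"))
    (false, false, false, true)
  if !st.1 then "lookup_failed"
  else if st.2.1 then "tabular_or_easy_parse"
  else if st.2.2.1 then "scientific_structured"
  else if st.2.2.2 then "archive_only"
  else "other_format"

-- ===== PRECONDITION & SPEC =====
def Spec_classify_usability (exts : List (Option String)) (out : String) : Prop := out = classify_usability_alt exts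
instance (exts : List (Option String)) (out : String) : Decidable (Spec_classify_usability exts out) := by unfold Spec_classify_usability; infer_instance

-- ===== CLAIM (what is proved, stated in full; the proofs are below) =====
def Claim_equal_classify_usability : Prop := ∀ (exts : List (Option String)), Dom_classify_usability exts → Spec_classify_usability exts (classify_usability exts)

-- ===== LEMMAS AND PROOFS =====

-- the lowered nonempty extensions, in input order
def pvL (exts : List (Option String)) : List String :=
  exts.filterMap (fun o =>
    match o with
    | none => none
    | some e => if e = "" then none else some (PySem.Str.lower e))

-- B's per-extension category
def pvCat (s : String) : String := PySem.Dict.getD pvLookup s "other"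

lemma pvTabular_eq : pvTabular = ["csv", "tsv", "xlsx", "xls", "json", "xml", "txt", "parquet"] := by decide
lemma pvScientific_eq : pvScientific = ["cif", "cif.gz", "nc", "h5", "hdf5", "cdf"] := by decide
lemma pvArchiveOnly_eq : pvArchiveOnly = ["zip", "tar", "tar.gz", "gz"] := by decide
lemma pvLookup_eq : pvLookup = PySem.Dict.mk
    [("csv", "tabular"), ("tsv", "tabular"), ("xlsx", "tabular"), ("xls", "tabular"),
     ("json", "tabular"), ("xml", "tabular"), ("txt", "tabular"), ("parquet", "tabular"),
     ("cif", "scientific"), ("cif.gz", "scientific"), ("nc", "scientific"),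
     ("h5", "scientific"), ("hdf5", "scientific"), ("cdf", "scientific"),
     ("zip", "archive"), ("tar", "archive"), ("tar.gz", "archive"), ("gz", "archive")] := by decide

-- the lookup table agrees with A's three sets, pointwise
lemma contains_tab (s : String) : PySem.Set.contains pvTabular s = (pvCat s == "tabular") := by
  rw [pvCat, pvTabular_eq, pvLookup_eq]
  rcases eq_or_ne s "csv" with h0 | h0
  · subst h0; decide
  rcases eq_or_ne s "tsv" with h1 | h1
  · subst h1; decide
  rcases eq_or_ne s "xlsx" with h2 | h2
  · subst h2; decide
  rcases eq_or_ne s "xls" with h3 | h3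
  · subst h3; decide
  rcases eq_or_ne s "json" with h4 | h4
  · subst h4; decide
  rcases eq_or_ne s "xml" with h5 | h5
  · subst h5; decide
  rcases eq_or_ne s "txt" with h6 | h6
  · subst h6; decide
  rcases eq_or_ne s "parquet" with h7 | h7
  · subst h7; decide
  rcases eq_or_ne s "cif" with h8 | h8
  · subst h8; decide
  rcases eq_or_ne s "cif.gz" with h9 | h9
  · subst h9; decide
  rcases eq_or_ne s "nc" with h10 | h10
  · subst h10; decide
  rcases eq_or_ne s "h5" with h11 | h11
  · subst h11; decide
  rcases eq_or_ne s "hdf5" with h12 | h12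
  · subst h12; decide
  rcases eq_or_ne s "cdf" with h13 | h13
  · subst h13; decide
  rcases eq_or_ne s "zip" with h14 | h14
  · subst h14; decide
  rcases eq_or_ne s "tar" with h15 | h15
  · subst h15; decide
  rcases eq_or_ne s "tar.gz" with h16 | h16
  · subst h16; decide
  rcases eq_or_ne s "gz" with h17 | h17
  · subst h17; decide
  simp [PySem.Set.contains, PySem.Dict.getD_eq_get?_getD, PySem.Dict.get?_mk_cons,
    PySem.Dict.get?, beq_iff_eq, h0, Ne.symm h0, h1, Ne.symm h1, h2, Ne.symm h2, h3, Ne.symm h3, h4, Ne.symm h4, h5, Ne.symm h5, h6, Ne.symm h6, h7, Ne.symm h7, h8, Ne.symm h8, h9, Ne.symm h9, h10, Ne.symm h10, h11, Ne.symm h11, h12, Ne.symm h12, h13, Ne.symm h13, h14, Ne.symm h14, h15, Ne.symm h15, h16, Ne.symm h16, h17, Ne.symm h17]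

lemma contains_sci (s : String) : PySem.Set.contains pvScientific s = (pvCat s == "scientific") := by
  rw [pvCat, pvScientific_eq, pvLookup_eq]
  rcases eq_or_ne s "csv" with h0 | h0
  · subst h0; decide
  rcases eq_or_ne s "tsv" with h1 | h1
  · subst h1; decide
  rcases eq_or_ne s "xlsx" with h2 | h2
  · subst h2; decide
  rcases eq_or_ne s "xls" with h3 | h3
  · subst h3; decide
  rcases eq_or_ne s "json" with h4 | h4
  · subst h4; decide
  rcases eq_or_ne s "xml" with h5 | h5
  · subst h5; decide
  rcases eq_or_ne s "txt" with h6 | h6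
  · subst h6; decide
  rcases eq_or_ne s "parquet" with h7 | h7
  · subst h7; decide
  rcases eq_or_ne s "cif" with h8 | h8
  · subst h8; decide
  rcases eq_or_ne s "cif.gz" with h9 | h9
  · subst h9; decide
  rcases eq_or_ne s "nc" with h10 | h10
  · subst h10; decide
  rcases eq_or_ne s "h5" with h11 | h11
  · subst h11; decide
  rcases eq_or_ne s "hdf5" with h12 | h12
  · subst h12; decide
  rcases eq_or_ne s "cdf" with h13 | h13
  · subst h13; decide
  rcases eq_or_ne s "zip" with h14 | h14
  · subst h14; decide
  rcases eq_or_ne s "tar" with h15 | h15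
  · subst h15; decide
  rcases eq_or_ne s "tar.gz" with h16 | h16
  · subst h16; decide
  rcases eq_or_ne s "gz" with h17 | h17
  · subst h17; decide
  simp [PySem.Set.contains, PySem.Dict.getD_eq_get?_getD, PySem.Dict.get?_mk_cons,
    PySem.Dict.get?, beq_iff_eq, h0, Ne.symm h0, h1, Ne.symm h1, h2, Ne.symm h2, h3, Ne.symm h3, h4, Ne.symm h4, h5, Ne.symm h5, h6, Ne.symm h6, h7, Ne.symm h7, h8, Ne.symm h8, h9, Ne.symm h9, h10, Ne.symm h10, h11, Ne.symm h11, h12, Ne.symm h12, h13, Ne.symm h13, h14, Ne.symm h14, h15, Ne.symm h15, h16, Ne.symm h16, h17, Ne.symm h17]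

lemma contains_arch (s : String) : PySem.Set.contains pvArchiveOnly s = (pvCat s == "archive") := by
  rw [pvCat, pvArchiveOnly_eq, pvLookup_eq]
  rcases eq_or_ne s "csv" with h0 | h0
  · subst h0; decide
  rcases eq_or_ne s "tsv" with h1 | h1
  · subst h1; decide
  rcases eq_or_ne s "xlsx" with h2 | h2
  · subst h2; decide
  rcases eq_or_ne s "xls" with h3 | h3
  · subst h3; decide
  rcases eq_or_ne s "json" with h4 | h4
  · subst h4; decide
  rcases eq_or_ne s "xml" with h5 | h5
  · subst h5; decide
  rcases eq_or_ne s "txt" with h6 | h6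
  · subst h6; decide
  rcases eq_or_ne s "parquet" with h7 | h7
  · subst h7; decide
  rcases eq_or_ne s "cif" with h8 | h8
  · subst h8; decide
  rcases eq_or_ne s "cif.gz" with h9 | h9
  · subst h9; decide
  rcases eq_or_ne s "nc" with h10 | h10
  · subst h10; decide
  rcases eq_or_ne s "h5" with h11 | h11
  · subst h11; decide
  rcases eq_or_ne s "hdf5" with h12 | h12
  · subst h12; decide
  rcases eq_or_ne s "cdf" with h13 | h13
  · subst h13; decide
  rcases eq_or_ne s "zip" with h14 | h14
  · subst h14; decide
  rcases eq_or_ne s "tar" with h15 | h15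
  · subst h15; decide
  rcases eq_or_ne s "tar.gz" with h16 | h16
  · subst h16; decide
  rcases eq_or_ne s "gz" with h17 | h17
  · subst h17; decide
  simp [PySem.Set.contains, PySem.Dict.getD_eq_get?_getD, PySem.Dict.get?_mk_cons,
    PySem.Dict.get?, beq_iff_eq, h0, Ne.symm h0, h1, Ne.symm h1, h2, Ne.symm h2, h3, Ne.symm h3, h4, Ne.symm h4, h5, Ne.symm h5, h6, Ne.symm h6, h7, Ne.symm h7, h8, Ne.symm h8, h9, Ne.symm h9, h10, Ne.symm h10, h11, Ne.symm h11, h12, Ne.symm h12, h13, Ne.symm h13, h14, Ne.symm h14, h15, Ne.symm h15, h16, Ne.symm h16, h17, Ne.symm h17]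

-- categories are disjoint: a "scientific" hit is never a "tabular" hit
lemma sci_step (c : String) : (!(c == "tabular") && (c == "scientific")) = (c == "scientific") := by
  rcases eq_or_ne c "scientific" with h | h
  · subst h; decide
  · simp [beq_iff_eq, h]

-- B's fold computes the four flags of pvL exts
lemma foldB (exts : List (Option String)) (st : Bool × Bool × Bool × Bool) :
    exts.foldl (fun (st : Bool × Bool × Bool × Bool) o =>
      match o with
      | none => st
      | some e =>
        if e = "" then st
        else
          let cat := PySem.Dict.getD pvLookup (PySem.Str.lower e) "other"
          (true,
           st.2.1 || cat == "tabular",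
           st.2.2.1 || (!(cat == "tabular") && cat == "scientific"),
           st.2.2.2 && cat == "archive")) st
    = (st.1 || !(pvL exts).isEmpty,
       st.2.1 || (pvL exts).any (fun s => pvCat s == "tabular"),
       st.2.2.1 || (pvL exts).any (fun s => !(pvCat s == "tabular") && (pvCat s == "scientific")),
       st.2.2.2 && (pvL exts).all (fun s => pvCat s == "archive")) := by
  induction exts generalizing st with
  | nil => simp [pvL]
  | cons o t ih =>
    cases o with
    | none => simp only [List.foldl_cons]; rw [ih]; simp [pvL, List.filterMap_cons]
    | some e =>
      by_cases he : e = ""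
      · simp only [List.foldl_cons, he, if_pos rfl]; rw [ih]; simp [pvL, List.filterMap_cons]
      · simp only [List.foldl_cons, if_neg he]
        rw [ih]
        simp [pvL, pvCat, List.filterMap_cons, he, Bool.or_assoc, Bool.and_assoc]

-- set-level facts in terms of the raw list
lemma ofList_isEmpty {α : Type} [BEq α] [LawfulBEq α] (L : List α) :
    (PySem.Set.ofList L).isEmpty = L.isEmpty := by
  cases L with
  | nil => rfl
  | cons x xs => rw [PySem.Set.ofList_cons]; rfl

lemma inter_ofList_any {α : Type} [BEq α] [LawfulBEq α] (L : List α) (t : PySem.Set α) :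
    (!(PySem.Set.inter (PySem.Set.ofList L) t).isEmpty) = L.any (fun x => PySem.Set.contains t x) := by
  apply Bool.eq_iff_iff.mpr
  simp [PySem.Set.inter, List.any_eq_true, PySem.Set.mem_ofList]

lemma issubset_ofList_all {α : Type} [BEq α] [LawfulBEq α] (L : List α) (t : PySem.Set α) :
    PySem.Set.issubset (PySem.Set.ofList L) t = L.all (fun x => PySem.Set.contains t x) := by
  apply Bool.eq_iff_iff.mpr
  simp [PySem.Set.issubset_iff, List.all_eq_true, PySem.Set.mem_ofList]

-- ===== VERDICT (by name: the statement is the Claim_ definition above) =====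
theorem classify_usability_spec : Claim_equal_classify_usability := by
  intro exts _
  unfold Spec_classify_usability classify_usability classify_usability_alt
  rw [foldB]
  have hL : (exts.filterMap (fun o =>
      match o with
      | none => none
      | some e => if e = "" then none else some (PySem.Str.lower e))) = pvL exts := rfl
  rw [hL]
  simp only [Bool.false_or, Bool.true_and, Bool.not_not,
    ofList_isEmpty, inter_ofList_any, issubset_ofList_all]
  have hTab : (fun x => PySem.Set.contains pvTabular x) = (fun s => pvCat s == "tabular") :=
    funext contains_tab
  have hSci : (fun x => PySem.Set.contains pvScientific x)
      = (fun s => !(pvCat s == "tabular") && (pvCat s == "scientific")) :=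
    funext (fun x => by rw [contains_sci x]; exact (sci_step _).symm)
  have hArch : (fun x => PySem.Set.contains pvArchiveOnly x) = (fun s => pvCat s == "archive") :=
    funext contains_arch
  rw [hTab, hSci, hArch]
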